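-- pv_equiv track=rewrite | github.com/Ikar20/Programing | laba5/main.py | optimiser
-- ===== SOURCE A (Python) =====
-- import math
--
-- def optimiser(heights):
--     heights = sorted(heights, reverse=True)
--     new_heights = []
--     for x in range(0, math.ceil(len(heights) / 2)):
--         new_heights.append(heights[x])
--         new_heights.append(1)
--     if len(heights) % 2:
--         new_heights.pop()
--     return new_heights
-- ===== SOURCE B (Python) =====
-- def optimiser(heights):
--     s = sorted(heights, reverse=True)
--     out = [1] * len(s)
--     out[0::2] = s[:(len(s) + 1) // 2]
--     return out
-- ===== Notes on version B (the rewrite author's own statement) =====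
-- stated objective: alternative
-- what changed: Instead of A's loop appending [height, 1] pairs over ceil(n/2) and popping the trailing 1, B allocates a list of n ones and overwrites its even positions with the top half of the sorted list in one strided slice assignment.
import Mathlib
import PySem

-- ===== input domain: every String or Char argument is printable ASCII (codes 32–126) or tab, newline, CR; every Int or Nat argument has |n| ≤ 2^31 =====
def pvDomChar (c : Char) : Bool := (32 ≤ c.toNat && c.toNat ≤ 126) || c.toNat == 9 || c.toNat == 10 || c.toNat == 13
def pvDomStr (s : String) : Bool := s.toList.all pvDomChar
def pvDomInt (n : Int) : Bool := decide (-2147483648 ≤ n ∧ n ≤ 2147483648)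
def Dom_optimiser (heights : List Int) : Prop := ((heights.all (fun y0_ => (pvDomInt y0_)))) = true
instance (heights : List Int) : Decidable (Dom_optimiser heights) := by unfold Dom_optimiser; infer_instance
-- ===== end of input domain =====

-- B replaces A's pair-appending loop over ceil(n/2) plus trailing pop by allocating n ones and
-- overwriting the even positions with the top half via a strided slice assignment (objective: alternative).

-- ===== PORT A =====
-- math.ceil(len/2) is exact here and equals (n+1)/2 on Nat; new_heights.pop() discards the
-- last element, i.e. dropLast on the return value.
def optimiser (heights : List Int) : List Int :=
  let hs := PySem.List.sorted heights (fun x => x) true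
  let new_heights := (PySem.List.pyRange 0 (((hs.length + 1) / 2 : Nat) : Int) 1).foldl
    (fun acc x => (acc ++ [PySem.List.pyGetD hs x 0]) ++ [1]) []
  if hs.length % 2 ≠ 0 then new_heights.dropLast else new_heights

-- ===== PORT B =====
-- Hand port of the strided slice assignment out[0::2] = vals: replace the elements at indices
-- 0, 2, 4, … by the elements of vals in order. Exact when vals.length = ceil(out.length / 2),
-- which holds at Source B's (only) call site; Python raises ValueError otherwise.
def setEvens : List Int → List Int → List Int
  | [], _ => []
  | a :: rest, [] => a :: rest
  | _ :: rest, v :: vs =>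
    match rest with
    | [] => [v]
    | b :: rest' => v :: b :: setEvens rest' vs

def optimiser_alt (heights : List Int) : List Int :=
  let s := PySem.List.sorted heights (fun x => x) true
  let out := List.replicate s.length (1 : Int)
  setEvens out (PySem.List.slice s none (some (((s.length + 1) / 2 : Nat) : Int)))

-- ===== PRECONDITION & SPEC =====
def Spec_optimiser (heights : List Int) (out : List Int) : Prop := out = optimiser_alt heights
instance (heights : List Int) (out : List Int) : Decidable (Spec_optimiser heights out) := by unfold Spec_optimiser; infer_instance

-- ===== CLAIM (what is proved, stated in full; the proofs are below) =====
def Claim_equal_optimiser : Prop := ∀ (heights : List Int), Dom_optimiser heights → Spec_optimiser heights (optimiser heights)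

-- ===== LEMMAS AND PROOFS =====

-- A's loop body, bridged to Nat indices: pairs [s[x], 1] joined over range m.
def pairJoin (s : List Int) (m : Nat) : List Int :=
  (List.range m).flatMap (fun x => [s.getD x 0, 1])

lemma pairJoin_succ (s : List Int) (m : Nat) :
    pairJoin s (m + 1) = pairJoin s m ++ [s.getD m 0, 1] := by
  simp [pairJoin, List.range_succ]

-- pairJoin over in-range indices is a flatMap over the taken prefix.
lemma pairJoin_eq_take (s : List Int) (m : Nat) (hm : m ≤ s.length) :
    pairJoin s m = (s.take m).flatMap (fun v => [v, 1]) := by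
  induction m with
  | zero => simp [pairJoin]
  | succ m ih =>
    rw [pairJoin_succ, ih (by omega), List.getD_eq_getElem s 0 (by omega : m < s.length),
        List.take_add_one, List.getElem?_eq_getElem (by omega : m < s.length),
        Option.toList_some, List.flatMap_append]
    rfl

-- B's slice assignment into a list of ones, characterised for matching lengths.
lemma setEvens_ones (vals : List Int) : ∀ (n : Nat), vals.length = (n + 1) / 2 →
    setEvens (List.replicate n 1) vals =
      (if n % 2 ≠ 0 then (vals.flatMap (fun v => [v, 1])).dropLast
       else vals.flatMap (fun v => [v, 1])) := by
  induction vals with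
  | nil =>
    intro n h
    have : n = 0 := by simp at h; omega
    subst this; simp [setEvens]
  | cons v vs ih =>
    intro n h
    match n with
    | 0 => simp at h
    | 1 =>
      have : vs = [] := by simpa using h
      subst this
      simp [setEvens, List.replicate]
    | (n + 2) =>
      have hlen : vs.length = (n + 1) / 2 := by simp at h; omega
      have : List.replicate (n + 2) (1 : Int) = 1 :: 1 :: List.replicate n 1 := by
        simp [List.replicate]
      rw [this]
      show v :: 1 :: setEvens (List.replicate n 1) vs = _
      rw [ih n hlen]
      by_cases hp : n % 2 = 0
      · have h2 : ¬ ((n + 2) % 2 ≠ 0) := by omega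
        simp [hp]
      · have h2 : (n + 2) % 2 ≠ 0 := by omega
        rw [if_pos hp, if_pos h2]
        have hne : vs.flatMap (fun v => [v, 1]) ≠ [] := by
          cases vs with
          | nil => exfalso; simp at hlen; omega
          | cons a t => simp
        show v :: 1 :: (vs.flatMap (fun v => [v, 1])).dropLast
            = (v :: 1 :: vs.flatMap (fun v => [v, 1])).dropLast
        rw [show v :: 1 :: vs.flatMap (fun v => [v, 1])
              = [v, 1] ++ vs.flatMap (fun v => [v, 1]) from rfl,
            List.dropLast_append_of_ne_nil hne]
        rfl

-- A's port bridged to pairJoin.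
lemma portA_eq (s : List Int) :
    ((PySem.List.pyRange 0 (((s.length + 1) / 2 : Nat) : Int) 1).foldl
      (fun acc x => (acc ++ [PySem.List.pyGetD s x 0]) ++ [1]) []) = pairJoin s ((s.length + 1) / 2) := by
  have hfun : (fun (acc : List Int) (x : Int) => (acc ++ [PySem.List.pyGetD s x 0]) ++ [1])
      = (fun acc x => acc ++ ([PySem.List.pyGetD s x 0] ++ [1])) := by
    funext acc x; simp
  rw [hfun, PySem.List.pyRange_zero_natCast, List.foldl_map,
      PySem.List.foldl_append_eq_flatMap (fun (k : Nat) => [PySem.List.pyGetD s ((k : Nat) : Int) 0] ++ [1])]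
  simp [pairJoin, PySem.List.pyGetD_natCast]

-- ===== VERDICT (by name: the statement is the Claim_ definition above) =====
theorem optimiser_spec : Claim_equal_optimiser := by
  intro heights _
  show optimiser heights = optimiser_alt heights
  simp only [optimiser, optimiser_alt]
  rw [portA_eq, PySem.List.slice_to_natCast]
  set s := PySem.List.sorted heights (fun x => x) true with hs
  have hm : (s.length + 1) / 2 ≤ s.length := by omega
  rw [setEvens_ones (s.take ((s.length + 1) / 2)) s.length
        (by rw [List.length_take]; omega),
      pairJoin_eq_take s _ hm]
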